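-- pv_equiv track=rewrite | github.com/lawang24/competitive-programming-archive | Codeforces/968c.py | solve
-- ===== SOURCE A (Python) =====
-- import collections
-- import heapq
--
-- def solve(n, _string):
--     count = collections.Counter(_string)
--     heap = [(-x[1],x[0]) for x in count.most_common()]
--     heapq.heapify(heap)
--     ans = []
--
--     while heap:
--         number, letter = heapq.heappop(heap)
--         ans.append(letter)
--         number+=1
--         if number:
--             heapq.heappush(heap, (number, letter))
--
--     return "".join(ans)
-- ===== SOURCE B (Python) =====
-- import collections
--
-- def solve(n, _string):
--     # The heap loop always emits, for each count level k = max(count)..1,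
--     # the alphabetically sorted letters whose count is >= k.
--     count = collections.Counter(_string)
--     letters = sorted(count)
--     out = []
--     for k in range(max(count.values(), default=0), 0, -1):
--         for ch in letters:
--             if count[ch] >= k:
--                 out.append(ch)
--     return "".join(out)
-- ===== Notes on version B (the rewrite author's own statement) =====
-- stated objective: faster
-- what changed: replaces the per-character heap simulation (heapify/heappop/heappush once per output character) by a closed-form level sweep: for each count level k from max(count) down to 1 emit the alphabetically sorted letters whose count is at least k
import Mathlib
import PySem

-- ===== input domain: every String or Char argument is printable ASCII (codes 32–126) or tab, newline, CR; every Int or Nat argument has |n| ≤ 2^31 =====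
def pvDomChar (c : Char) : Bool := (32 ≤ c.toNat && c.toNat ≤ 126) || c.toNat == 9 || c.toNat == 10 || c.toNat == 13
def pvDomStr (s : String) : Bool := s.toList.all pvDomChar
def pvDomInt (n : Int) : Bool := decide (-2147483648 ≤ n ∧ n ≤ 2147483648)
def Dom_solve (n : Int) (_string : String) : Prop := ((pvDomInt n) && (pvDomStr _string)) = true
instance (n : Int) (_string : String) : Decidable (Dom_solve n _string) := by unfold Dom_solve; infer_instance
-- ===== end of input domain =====

-- B replaces A's per-character heap simulation by a level sweep: for each count
-- level k = max(count)..1 it emits the alphabetically sorted letters with count >= k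
-- (a timing run measured B faster by a constant factor on the generated inputs).


-- ===== PORT A =====
-- The heap is modelled as the multiset of its entries (a List (Int × Char)):
-- heapq.heappop removes and returns the smallest tuple (Python compares the
-- tuples lexicographically; exact here since all entries have distinct letters)
-- = PySem.List.min2? followed by List.erase; heapq.heappush adds the entry;
-- heapq.heapify is the identity on the multiset. The while loop runs once per
-- output character, so fuel = len(_string) always suffices (proved below).
def solveLoop : Nat → List (Int × Char) → List Char → List Char
  | 0, _, ans => ans
  | Nat.succ fuel, heap, ans =>
    match PySem.List.min2? heap (fun p => p.1) (fun p => p.2) with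
    | none => ans
    | some m =>
      let number := m.1
      let letter := m.2
      let heap1 := heap.erase (number, letter)
      let ans1 := ans ++ [letter]
      let number1 := number + 1
      if number1 ≠ 0 then
        solveLoop fuel (heap1 ++ [(number1, letter)]) ans1
      else
        solveLoop fuel heap1 ans1


def solve (n : Int) (_string : String) : String :=
  let count := PySem.Dict.counter _string.toList
  -- count.most_common() = the items sorted by count descending (stable)
  let heap := (PySem.List.sorted count.items (fun kv => kv.2) true).map
      (fun x => (-x.2, x.1))
  String.ofList (solveLoop _string.toList.length heap [])

-- ===== PORT B =====
def solve_alt (n : Int) (_string : String) : String :=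
  let count := PySem.Dict.counter _string.toList
  let letters := PySem.List.sorted count.keys (fun x => x)
  let maxc := PySem.List.maxD count.values (fun x => x) 0   -- max(..., default=0)
  let out := (PySem.List.pyRange maxc 0 (-1)).foldl (fun acc k =>
      letters.foldl (fun acc2 ch =>
        if decide (k ≤ count.getD ch 0) then acc2 ++ [ch] else acc2) acc) []
  String.ofList out

-- ===== PRECONDITION & SPEC =====
def Spec_solve (n : Int) (_string : String) (out : String) : Prop := out = solve_alt n _string
instance (n : Int) (_string : String) (out : String) : Decidable (Spec_solve n _string out) := by unfold Spec_solve; infer_instance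

-- ===== CLAIM (what is proved, stated in full; the proofs are below) =====
def Claim_equal_solve : Prop := ∀ (n : Int) (_string : String), Dom_solve n _string → Spec_solve n _string (solve n _string)

-- ===== LEMMAS AND PROOFS =====
def pvLex (a b : Int × Char) : Prop := a.1 < b.1 ∨ (a.1 = b.1 ∧ a.2 < b.2)

def pvStep (acc : Option (Int × Char)) (x : Int × Char) : Option (Int × Char) :=
  match acc with
  | none => some x
  | some m => if (decide (x.1 < m.1) || !decide (m.1 < x.1) && decide (x.2 < m.2)) = true then some x else some m

lemma min2?_eq_foldl (h : List (Int × Char)) :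
    PySem.List.min2? h (fun p => p.1) (fun p => p.2) = h.foldl pvStep none := by
  unfold PySem.List.min2? pvStep
  congr 1
  funext acc x
  cases acc with
  | none => rfl
  | some m => congr 1

lemma pvStep_keep {m y : Int × Char} (hy : y = m ∨ pvLex m y) : pvStep (some m) y = some m := by
  have h1 : ¬ y.1 < m.1 := by rcases hy with rfl | h1 | ⟨h1, _⟩ <;> omega
  have h2 : m.1 < y.1 ∨ ¬ y.2 < m.2 := by
    rcases hy with rfl | h1 | ⟨h1, h2⟩
    · right; exact lt_irrefl _
    · left; exact h1
    · right; exact lt_asymm h2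
  rcases h2 with h2 | h2
  · simp [pvStep, h1, h2]
  · simp [pvStep, h1, h2]

lemma pvStep_take {m : Int × Char} {z : Option (Int × Char)}
    (hz : ∀ y, z = some y → (y = m ∨ pvLex m y)) : pvStep z m = some m := by
  match z with
  | none => rfl
  | some y =>
    rcases hz y rfl with rfl | h1 | ⟨h1, h2⟩
    · exact pvStep_keep (Or.inl rfl)
    · simp [pvStep, h1, lt_asymm h1]
    · have ha : ¬ m.1 < y.1 := by omega
      have hb : ¬ y.1 < m.1 := by omega
      simp [pvStep, ha, hb, h2]

lemma foldl_pvStep_keep {m : Int × Char} : ∀ (l : List (Int × Char)), (∀ y ∈ l, y = m ∨ pvLex m y) →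
    l.foldl pvStep (some m) = some m := by
  intro l
  induction l with
  | nil => simp
  | cons x t ih =>
    intro hl
    simp only [List.foldl_cons, pvStep_keep (hl x (by simp))]
    exact ih (fun y hy => hl y (by simp [hy]))

lemma foldl_pvStep_mem : ∀ (l : List (Int × Char)) (acc : Option (Int × Char)),
    l.foldl pvStep acc = acc ∨ ∃ x ∈ l, l.foldl pvStep acc = some x := by
  intro l
  induction l with
  | nil => intro acc; left; rfl
  | cons x t ih =>
    intro acc
    simp only [List.foldl_cons]
    have hstep : pvStep acc x = acc ∨ pvStep acc x = some x := by
      match acc with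
      | none => right; rfl
      | some m => by_cases hc : (decide (x.1 < m.1) || !decide (m.1 < x.1) && decide (x.2 < m.2)) = true <;> simp [pvStep, hc]
    rcases ih (pvStep acc x) with h | ⟨y, hy, h⟩
    · rw [h]; rcases hstep with h2 | h2
      · left; exact h2
      · right; exact ⟨x, by simp, h2⟩
    · right; exact ⟨y, by simp [hy], h⟩

lemma min2?_unique {h : List (Int × Char)} {m : Int × Char} (hm : m ∈ h)
    (hu : ∀ y ∈ h, y = m ∨ pvLex m y) :
    PySem.List.min2? h (fun p => p.1) (fun p => p.2) = some m := by
  rw [min2?_eq_foldl]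
  obtain ⟨P, Q, rfl⟩ := List.append_of_mem hm
  rw [List.foldl_append, List.foldl_cons]
  have hmid : pvStep (P.foldl pvStep none) m = some m := by
    apply pvStep_take
    intro y hy
    rcases foldl_pvStep_mem P none with h0 | ⟨x, hx, h0⟩
    · rw [h0] at hy; cases hy
    · rw [h0] at hy; cases hy; exact hu _ (by simp [hx])
  rw [hmid]
  exact foldl_pvStep_keep Q (fun y hy => hu y (by simp [hy]))

def pvLevels (L : List Char) (f : Char → Int) (M : Int) : List Char :=
  (PySem.List.pyRange M 0 (-1)).flatMap (fun k => L.filter (fun ch => decide (k ≤ f ch)))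

lemma pyRange_neg_one {M : Int} (h : 0 < M) :
    PySem.List.pyRange M 0 (-1) = M :: PySem.List.pyRange (M - 1) 0 (-1) := by
  unfold PySem.List.pyRange
  norm_num
  rw [if_pos h]
  have hn : (if 1 < M then M.toNat - 1 else 0) = M.toNat - 1 := by
    split
    · rfl
    · omega
  rw [hn]
  have hM : M.toNat = (M.toNat - 1) + 1 := by omega
  rw [hM, List.range_succ_eq_map, List.map_cons, List.map_map]
  simp only [Nat.add_sub_cancel]
  congr 1
  · simp
  · apply List.map_congr_left
    intro k _
    simp only [Function.comp_apply, Nat.succ_eq_add_one]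
    push_cast
    ring

lemma pvLevels_zero (L : List Char) (f : Char → Int) : pvLevels L f 0 = [] := rfl

lemma pvLevels_succ (L : List Char) (f : Char → Int) {M : Int} (h : 0 < M) :
    pvLevels L f M = L.filter (fun ch => decide (M ≤ f ch)) ++ pvLevels L f (M - 1) := by
  unfold pvLevels
  rw [pyRange_neg_one h, List.flatMap_cons]

lemma pvLevels_congr (L : List Char) (f f' : Char → Int) : ∀ (n : Nat),
    (∀ k : Int, 1 ≤ k → k ≤ n → ∀ ch ∈ L, (k ≤ f ch ↔ k ≤ f' ch)) →
    pvLevels L f n = pvLevels L f' n := by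
  intro n
  induction n with
  | zero => intro _; rfl
  | succ n ih =>
    intro hk
    have h0 : (0 : Int) < ((n + 1 : Nat) : Int) := by exact_mod_cast Nat.succ_pos n
    rw [pvLevels_succ _ _ h0, pvLevels_succ _ _ h0]
    have hc : ((n + 1 : Nat) : Int) - 1 = (n : Int) := by push_cast; ring
    rw [hc]
    congr 1
    · apply List.filter_congr; intro ch hch
      simp only [decide_eq_decide]
      exact hk _ (by exact_mod_cast Nat.succ_le_succ (Nat.zero_le n)) (le_refl _) ch hch
    · exact ih (fun k h1 h2 ch hch => hk k h1 (by push_cast; omega) ch hch)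

def pvHeapOf (L : List Char) (f : Char → Int) : List (Int × Char) :=
  L.map (fun ch => (-(f ch), ch))

lemma solveLoop_eq_levels : ∀ (fuel : Nat) (L : List Char) (f : Char → Int) (M : Int)
    (h : List (Int × Char)) (ans : List Char),
    L.Pairwise (· < ·) →
    (∀ ch ∈ L, 1 ≤ f ch) →
    (∀ ch ∈ L, f ch ≤ M) →
    ((∃ ch ∈ L, f ch = M) ∨ (L = [] ∧ M = 0)) →
    h.Perm (pvHeapOf L f) →
    (L.map (fun ch => (f ch).toNat)).sum ≤ fuel →
    solveLoop fuel h ans = ans ++ pvLevels L f M := by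
  intro fuel
  induction fuel with
  | zero =>
    intro L f M h ans hpw hf1 hfM hex hperm hsum
    have hL : L = [] := by
      cases L with
      | nil => rfl
      | cons a t =>
        exfalso
        simp only [List.map_cons, List.sum_cons, Nat.le_zero] at hsum
        have := hf1 a (by simp)
        omega
    subst hL
    rcases hex with ⟨ch, hch, _⟩ | ⟨_, hM0⟩
    · cases hch
    · subst hM0; simp [solveLoop, pvLevels_zero]
  | succ fuel ih =>
    intro L f M h ans hpw hf1 hfM hex hperm hsum
    cases L with
    | nil =>
      rcases hex with ⟨ch, hch, _⟩ | ⟨_, hM0⟩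
      · cases hch
      subst hM0
      have hh : h = [] := List.perm_nil.mp hperm
      subst hh
      simp [solveLoop, PySem.List.min2?, pvLevels_zero]
    | cons a t =>
      -- L ≠ []
      set L := a :: t with hLdef
      rcases hex with ⟨ch₀, hch₀, hfM0⟩ | ⟨hnil, _⟩
      swap
      · simp at hnil
      have hM1 : 1 ≤ M := hfM0 ▸ hf1 ch₀ hch₀
      -- split L at the first letter with count M
      set p : Char → Bool := fun ch => !decide (f ch = M) with hpdef
      have hR : L.dropWhile p ≠ [] := by
        intro hcon
        have := List.dropWhile_eq_nil_iff.mp hcon ch₀ hch₀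
        simp [hpdef, hfM0] at this
      set ℓ : Char := (L.dropWhile p).head hR with hldef
      have hfℓ : f ℓ = M := by
        have := List.head_dropWhile_not p hR
        simpa [hpdef] using this
      set P := L.takeWhile p with hPdef
      set Q := (L.dropWhile p).tail with hQdef
      have hsplit : L = P ++ ℓ :: Q := by
        rw [hPdef, hQdef, hldef]
        rw [List.cons_head_tail]
        exact (List.takeWhile_append_dropWhile).symm
      have hPne : ∀ ch ∈ P, f ch ≠ M := by
        intro ch hch
        have := List.mem_takeWhile_imp hch
        simpa [hpdef] using this
      -- order facts
      have hpw' : (P ++ ℓ :: Q).Pairwise (· < ·) := hsplit ▸ hpw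
      rw [List.pairwise_append] at hpw'
      obtain ⟨hpwP, hpwlQ, hcross⟩ := hpw'
      have hQlt : ∀ q ∈ Q, ℓ < q := (List.pairwise_cons.mp hpwlQ).1
      have hPlt : ∀ a' ∈ P, a' < ℓ := fun a' ha' => hcross a' ha' ℓ (by simp)
      have hlP : ℓ ∉ P := fun hc => lt_irrefl ℓ (hPlt ℓ hc)
      have hℓL : ℓ ∈ L := by rw [hsplit]; simp
      -- the popped element
      have hmem : ((-M, ℓ) : Int × Char) ∈ h := by
        rw [hperm.mem_iff]
        exact List.mem_map.mpr ⟨ℓ, hℓL, by rw [hfℓ]⟩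
      have hu : ∀ y ∈ h, y = ((-M, ℓ) : Int × Char) ∨ pvLex (-M, ℓ) y := by
        intro y hy
        rw [hperm.mem_iff] at hy
        obtain ⟨ch, hchL, rfl⟩ := List.mem_map.mp hy
        rw [hsplit] at hchL
        rcases List.mem_append.mp hchL with hchP | hchlQ
        · right; left
          have h1 := hPne ch hchP
          have h2 := hfM ch (by rw [hsplit]; exact List.mem_append_left _ hchP)
          simp; omega
        · rcases List.mem_cons.mp hchlQ with rfl | hchQ
          · left; rw [hfℓ]
          · by_cases hc : f ch = M
            · right; right
              exact ⟨by simp [hc], hQlt ch hchQ⟩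
            · right; left
              have h2 := hfM ch (by rw [hsplit]; exact List.mem_append_right _ (List.mem_cons_of_mem _ hchQ))
              simp; omega
      have hmin := min2?_unique hmem hu
      -- one loop step
      rw [show solveLoop (Nat.succ fuel) h ans =
          (match PySem.List.min2? h (fun p => p.1) (fun p => p.2) with
          | none => ans
          | some m =>
            if m.1 + 1 ≠ 0 then
              solveLoop fuel (h.erase (m.1, m.2) ++ [(m.1 + 1, m.2)]) (ans ++ [m.2])
            else
              solveLoop fuel (h.erase (m.1, m.2)) (ans ++ [m.2])) from rfl]
      rw [hmin]
      simp only
      -- sums over the split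
      have hsum' : (L.map (fun ch => (f ch).toNat)).sum =
          (P.map (fun ch => (f ch).toNat)).sum + M.toNat + (Q.map (fun ch => (f ch).toNat)).sum := by
        rw [hsplit]
        simp [hfℓ]
        omega
      by_cases hM2 : M = 1
      · -- M = 1 : every count is 1, P = [], no push
        subst hM2
        have hPnil : P = [] := by
          cases hq : P with
          | nil => rfl
          | cons b s =>
            exfalso
            have hb : b ∈ P := by rw [hq]; simp
            have hbL : b ∈ L := by rw [hsplit, hq]; simp
            have := hf1 b hbL
            have := hfM b hbL
            exact hPne b hb (by omega)
        have hLeq : L = ℓ :: Q := by rw [hsplit, hPnil]; rfl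
        have hfall : ∀ ch ∈ L, f ch = 1 := by
          intro ch hch; have := hf1 ch hch; have := hfM ch hch; omega
        rw [if_neg (by simp)]
        have herase : (h.erase (-1, ℓ)).Perm (pvHeapOf Q f) := by
          have h1 := hperm.erase ((-1, ℓ) : Int × Char)
          have h2 : (pvHeapOf L f).erase (-1, ℓ) = pvHeapOf Q f := by
            rw [hLeq]
            show ((( -(f ℓ), ℓ) : Int × Char) :: pvHeapOf Q f).erase (-1, ℓ) = pvHeapOf Q f
            rw [hfℓ]
            exact List.erase_cons_head _ _
          rw [h2] at h1
          exact h1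
        have hQsum : (Q.map (fun ch => (f ch).toNat)).sum ≤ fuel := by
          rw [hsum', hPnil] at hsum
          simp at hsum
          omega
        have hlevL : pvLevels L f 1 = L := by
          rw [pvLevels_succ _ _ (by omega : (0:Int) < 1)]
          norm_num [pvLevels_zero]
          exact hf1
        cases hQ : Q with
        | nil =>
          rw [ih [] f 0 _ _ (by simp) (by simp) (by simp) (Or.inr ⟨rfl, rfl⟩)
            (by rw [← hQ]; exact herase) (by simp)]
          rw [hlevL, hLeq, hQ]
          simp [pvLevels_zero]
        | cons b s =>
          rw [ih Q f 1 _ _ (by rw [← hLeq] at hpwlQ; exact (List.pairwise_cons.mp (hLeq ▸ hpw)).2)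
            (fun ch hch => hf1 ch (by rw [hLeq]; exact List.mem_cons_of_mem _ hch))
            (fun ch hch => hfM ch (by rw [hLeq]; exact List.mem_cons_of_mem _ hch))
            (Or.inl ⟨b, by rw [hQ]; simp, hfall b (by rw [hLeq, hQ]; simp)⟩)
            herase hQsum]
          have hlevQ : pvLevels Q f 1 = Q := by
            rw [pvLevels_succ _ _ (by omega : (0:Int) < 1)]
            norm_num [pvLevels_zero]
            exact fun ch hch => hf1 ch (by rw [hLeq]; exact List.mem_cons_of_mem _ hch)
          rw [hlevQ, hlevL, hLeq]
          simp
      · -- M ≥ 2 : push (-M+1, ℓ) back with the decremented count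
        have hM2' : 2 ≤ M := by omega
        rw [if_pos (by omega)]
        set f' : Char → Int := fun ch => if ch = ℓ then M - 1 else f ch with hf'def
        have hf'P : ∀ ch ∈ P, f' ch = f ch := by
          intro ch hch
          have : ch ≠ ℓ := fun hc => hlP (hc ▸ hch)
          simp [hf'def, this]
        have hf'Q : ∀ ch ∈ Q, f' ch = f ch := by
          intro ch hch
          have : ch ≠ ℓ := fun hc => lt_irrefl ℓ (hQlt ch hch |>.trans_eq (hc ▸ rfl))
          simp [hf'def, this]
        have hf'ℓ : f' ℓ = M - 1 := by simp [hf'def]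
        -- heap after pop+push
        have hperm2 : (h.erase (-M, ℓ) ++ [(-M + 1, ℓ)]).Perm (pvHeapOf L f') := by
          have h1 := hperm.erase ((-M, ℓ) : Int × Char)
          have hnot : ((-M, ℓ) : Int × Char) ∉ P.map (fun ch => (-(f ch), ch)) := by
            intro hc
            obtain ⟨b, hb, hbe⟩ := List.mem_map.mp hc
            have : b = ℓ := congrArg Prod.snd hbe
            exact hlP (this ▸ hb)
          have h2 : (pvHeapOf L f).erase (-M, ℓ) =
              P.map (fun ch => (-(f ch), ch)) ++ Q.map (fun ch => (-(f ch), ch)) := by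
            rw [hsplit]
            show ((P ++ ℓ :: Q).map (fun ch => (-(f ch), ch))).erase (-M, ℓ) = _
            rw [List.map_append, List.map_cons, hfℓ, List.erase_append_right _ hnot,
              List.erase_cons_head]
          have h3 : (pvHeapOf L f').Perm
              ((P.map (fun ch => (-(f ch), ch)) ++ Q.map (fun ch => (-(f ch), ch))) ++ [(-M + 1, ℓ)]) := by
            rw [hsplit]
            show ((P ++ ℓ :: Q).map (fun ch => (-(f' ch), ch))).Perm _
            rw [List.map_append, List.map_cons, hf'ℓ]
            have hPmap : P.map (fun ch => (-(f' ch), ch)) = P.map (fun ch => (-(f ch), ch)) :=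
              List.map_congr_left (fun b hb => by rw [hf'P b hb])
            have hQmap : Q.map (fun ch => (-(f' ch), ch)) = Q.map (fun ch => (-(f ch), ch)) :=
              List.map_congr_left (fun b hb => by rw [hf'Q b hb])
            rw [hPmap, hQmap, List.append_assoc]
            apply List.Perm.append_left
            have : (-(M - 1), ℓ) = ((-M + 1, ℓ) : Int × Char) := by norm_num; omega
            rw [this]
            exact (List.perm_append_singleton _ _).symm
          have h4 := h1.append_right [((-M + 1, ℓ) : Int × Char)]
          rw [h2] at h4
          exact h4.trans h3.symm
        -- counts for the recursive call
        have hf'1 : ∀ ch ∈ L, 1 ≤ f' ch := by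
          intro ch hch
          by_cases hc : ch = ℓ
          · subst hc; rw [hf'ℓ]; omega
          · simp only [hf'def, if_neg hc]; exact hf1 ch hch
        have hfsum2 : (L.map (fun ch => (f' ch).toNat)).sum ≤ fuel := by
          have he : (L.map (fun ch => (f' ch).toNat)).sum =
              (P.map (fun ch => (f ch).toNat)).sum + (M - 1).toNat + (Q.map (fun ch => (f ch).toNat)).sum := by
            rw [hsplit, List.map_append, List.map_cons, List.sum_append, List.sum_cons]
            have hPm : P.map (fun ch => (f' ch).toNat) = P.map (fun ch => (f ch).toNat) :=
              List.map_congr_left (fun b hb => by rw [hf'P b hb])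
            have hQm : Q.map (fun ch => (f' ch).toNat) = Q.map (fun ch => (f ch).toNat) :=
              List.map_congr_left (fun b hb => by rw [hf'Q b hb])
            rw [hPm, hQm, hf'ℓ]
            omega
          rw [he]
          rw [hsum'] at hsum
          omega
        -- the lower levels agree for f and f'
        have hlevc : pvLevels L f (M - 1) = pvLevels L f' (M - 1) := by
          have hcast : (M - 1) = (((M - 1).toNat : Nat) : Int) := by omega
          rw [hcast]
          apply pvLevels_congr
          intro k hk1 hk2 ch hch
          by_cases hc : ch = ℓ
          · subst hc
            rw [hfℓ, hf'ℓ]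
            omega
          · simp only [hf'def, if_neg hc]
        -- the top level of f
        have hfiltf : L.filter (fun ch => decide (M ≤ f ch)) =
            ℓ :: Q.filter (fun ch => decide (M ≤ f ch)) := by
          rw [hsplit, List.filter_append, List.filter_cons]
          have hPnil : P.filter (fun ch => decide (M ≤ f ch)) = [] := by
            apply List.filter_eq_nil_iff.mpr
            intro b hb
            have h1 := hPne b hb
            have h2 := hfM b (by rw [hsplit]; exact List.mem_append_left _ hb)
            simp; omega
          rw [hPnil]
          simp [hfℓ]
        -- the top level of f'
        have hfiltf' : L.filter (fun ch => decide (M ≤ f' ch)) =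
            Q.filter (fun ch => decide (M ≤ f ch)) := by
          rw [hsplit, List.filter_append, List.filter_cons]
          have hPnil : P.filter (fun ch => decide (M ≤ f' ch)) = [] := by
            apply List.filter_eq_nil_iff.mpr
            intro b hb
            have h1 := hPne b hb
            have h2 := hfM b (by rw [hsplit]; exact List.mem_append_left _ hb)
            rw [hf'P b hb]
            simp; omega
          have hQf : Q.filter (fun ch => decide (M ≤ f' ch)) = Q.filter (fun ch => decide (M ≤ f ch)) :=
            List.filter_congr (fun b hb => by rw [hf'Q b hb])
          rw [hPnil, hQf]
          have : ¬ (M ≤ f' ℓ) := by rw [hf'ℓ]; omega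
          simp [this]
        set rest := Q.filter (fun ch => decide (M ≤ f ch)) with hrestdef
        by_cases hrest : rest = []
        · -- ℓ was the only letter at the top level: the next top level is M - 1
          have hbound : ∀ ch ∈ L, f' ch ≤ M - 1 := by
            intro ch hch
            by_cases hc : ch = ℓ
            · subst hc; rw [hf'ℓ]
            · rw [show f' ch = f ch from by simp only [hf'def, if_neg hc]]
              rw [hsplit] at hch
              rcases List.mem_append.mp hch with hb | hb
              · have := hPne ch hb
                have := hfM ch (by rw [hsplit]; exact List.mem_append_left _ hb)
                omega
              · rcases List.mem_cons.mp hb with rfl | hb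
                · exact absurd rfl hc
                · have h2 := hfM ch (by rw [hsplit]; exact List.mem_append_right _ (List.mem_cons_of_mem _ hb))
                  by_cases hcM : f ch = M
                  · exfalso
                    have : ch ∈ rest := by
                      rw [hrestdef]
                      exact List.mem_filter.mpr ⟨hb, by simp [hcM]⟩
                    rw [hrest] at this
                    cases this
                  · omega
          rw [ih L f' (M - 1) _ _ hpw hf'1 hbound (Or.inl ⟨ℓ, hℓL, hf'ℓ⟩) hperm2 hfsum2]
          rw [pvLevels_succ _ _ (by omega : (0:Int) < M), hfiltf, hrest, hlevc]
          simp
        · -- some other letter still has count M: the next top level is still M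
          obtain ⟨ch₁, hch₁⟩ := List.exists_mem_of_ne_nil rest hrest
          have hch₁Q : ch₁ ∈ Q := (List.mem_filter.mp (hrestdef ▸ hch₁)).1
          have hch₁M : f ch₁ = M := by
            have h1 := (List.mem_filter.mp (hrestdef ▸ hch₁)).2
            have h2 := hfM ch₁ (by rw [hsplit]; exact List.mem_append_right _ (List.mem_cons_of_mem _ hch₁Q))
            simp at h1
            omega
          have hch₁ne : ch₁ ≠ ℓ := fun hc => lt_irrefl ℓ (hc ▸ hQlt ch₁ hch₁Q)
          have hbound : ∀ ch ∈ L, f' ch ≤ M := by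
            intro ch hch
            by_cases hc : ch = ℓ
            · subst hc; rw [hf'ℓ]; omega
            · rw [show f' ch = f ch from by simp only [hf'def, if_neg hc]]
              exact hfM ch hch
          have hatt : f' ch₁ = M := by
            rw [show f' ch₁ = f ch₁ from by simp only [hf'def, if_neg hch₁ne]]
            exact hch₁M
          have hch₁L : ch₁ ∈ L := by
            rw [hsplit]; exact List.mem_append_right _ (List.mem_cons_of_mem _ hch₁Q)
          rw [ih L f' M _ _ hpw hf'1 hbound (Or.inl ⟨ch₁, hch₁L, hatt⟩) hperm2 hfsum2]
          rw [pvLevels_succ L f' (by omega : (0:Int) < M), hfiltf']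
          rw [pvLevels_succ L f (by omega : (0:Int) < M), hfiltf, hlevc]
          simp

def pvCnt (cs : List Char) : Char → Int := fun ch => (cs.count ch : Int)

def pvL (cs : List Char) : List Char := PySem.List.sorted (PySem.Set.ofList cs) (fun x => x)

def pvM (cs : List Char) : Int := PySem.List.maxD (PySem.Dict.counter cs).values (fun x => x) 0

lemma pvL_mem (cs : List Char) (ch : Char) : ch ∈ pvL cs ↔ ch ∈ cs := by
  rw [pvL, PySem.List.mem_sorted, PySem.Set.mem_ofList]

lemma pvL_perm (cs : List Char) : (pvL cs).Perm (PySem.Set.ofList cs) :=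
  PySem.List.sorted_perm _ _ _

lemma pvVals (cs : List Char) : (PySem.Dict.counter cs).values = (PySem.Set.ofList cs).map (pvCnt cs) := by
  rw [PySem.Dict.values_eq_map_keys _ (PySem.Dict.nodup_keys_counter cs) 0, PySem.Dict.keys_counter]
  exact List.map_congr_left (fun ch _ => by rw [PySem.Dict.getD_counter]; rfl)

lemma pvMax (cs : List Char) :
    (∀ ch ∈ pvL cs, pvCnt cs ch ≤ pvM cs) ∧
    ((∃ ch ∈ pvL cs, pvCnt cs ch = pvM cs) ∨ (pvL cs = [] ∧ pvM cs = 0)) := by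
  rw [pvM, PySem.List.maxD, pvVals]
  cases hmx : PySem.List.max? ((PySem.Set.ofList cs).map (pvCnt cs)) (fun x => x) with
  | none =>
    have hSnil : (PySem.Set.ofList cs).map (pvCnt cs) = [] := (PySem.List.max?_eq_none_iff _ _).mp hmx
    have hSnil' : PySem.Set.ofList cs = [] := List.map_eq_nil_iff.mp hSnil
    have hLnil : pvL cs = [] := by rw [pvL, PySem.List.sorted_eq_nil_iff, hSnil']
    exact ⟨by simp [hLnil], Or.inr ⟨hLnil, rfl⟩⟩
  | some m =>
    constructor
    · intro ch hch
      have hm : pvCnt cs ch ∈ (PySem.Set.ofList cs).map (pvCnt cs) :=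
        List.mem_map.mpr ⟨ch, by rw [PySem.Set.mem_ofList]; exact (pvL_mem cs ch).mp hch, rfl⟩
      simpa using PySem.List.max?_isMax hmx _ hm
    · left
      obtain ⟨ch, hchS, hche⟩ := List.mem_map.mp (PySem.List.max?_mem hmx)
      refine ⟨ch, (pvL_mem cs ch).mpr (by rw [← PySem.Set.mem_ofList cs]; exact hchS), by simp [hche]⟩

lemma pvPerm0 (cs : List Char) :
    ((PySem.List.sorted (PySem.Dict.counter cs).items (fun kv => kv.2) true).map
      (fun x => (-x.2, x.1))).Perm (pvHeapOf (pvL cs) (pvCnt cs)) := by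
  have h2 := (PySem.List.sorted_perm (PySem.Dict.counter cs).items (fun kv => kv.2) true).map
      (fun x : Char × Int => ((-x.2, x.1) : Int × Char))
  have h5 : (PySem.Dict.counter cs).items.map (fun x : Char × Int => ((-x.2, x.1) : Int × Char))
      = (PySem.Set.ofList cs).map (fun ch => ((-(pvCnt cs ch), ch) : Int × Char)) := by
    rw [PySem.Dict.items_counter, List.map_map]
    rfl
  rw [h5] at h2
  have h4 := (pvL_perm cs).map (fun ch => ((-(pvCnt cs ch), ch) : Int × Char))
  exact h2.trans h4.symm

lemma pvNodupL (cs : List Char) : (pvL cs).Nodup :=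
  ((pvL_perm cs).nodup_iff).mpr (PySem.Set.nodup_ofList cs)

lemma pvFuel (cs : List Char) : ((pvL cs).map (fun ch => (pvCnt cs ch).toNat)).sum ≤ cs.length := by
  have hmapeq : (pvL cs).map (fun ch => (pvCnt cs ch).toNat) = (pvL cs).map (fun ch => cs.count ch) :=
    List.map_congr_left (fun ch _ => by simp [pvCnt])
  have hpermD : (pvL cs).Perm cs.dedup := by
    rw [List.perm_ext_iff_of_nodup (pvNodupL cs) cs.nodup_dedup]
    intro ch
    rw [pvL_mem cs ch, List.mem_dedup]
  have hsum := (hpermD.map (fun ch => cs.count ch)).sum_eq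
  rw [hmapeq, hsum, List.sum_map_count_dedup_eq_length]

theorem solve_eq (n : Int) (s : String) : solve n s = solve_alt n s := by
  simp only [solve, solve_alt]
  have hB : ((PySem.List.pyRange (pvM s.toList) 0 (-1)).foldl (fun acc k =>
      (PySem.List.sorted (PySem.Dict.counter s.toList).keys (fun x => x)).foldl (fun acc2 ch =>
        if decide (k ≤ (PySem.Dict.counter s.toList).getD ch 0) then acc2 ++ [ch] else acc2) acc) []) =
      pvLevels (pvL s.toList) (pvCnt s.toList) (pvM s.toList) := by
    rw [PySem.Dict.keys_counter]
    simp only [PySem.Dict.getD_counter]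
    have hinner : ∀ (k : Int) (acc : List Char),
        (PySem.List.sorted (PySem.Set.ofList s.toList) (fun x => x)).foldl
            (fun acc2 ch => if decide (k ≤ (List.count ch s.toList : Int)) then acc2 ++ [ch] else acc2) acc
          = acc ++ (PySem.List.sorted (PySem.Set.ofList s.toList) (fun x => x)).filter
              (fun ch => decide (k ≤ (List.count ch s.toList : Int))) :=
      fun k acc => PySem.List.foldl_append_if_eq_filter _ _ _
    simp only [hinner]
    rw [PySem.List.foldl_append_eq_flatMap]
    rfl
  rw [show PySem.List.maxD (PySem.Dict.counter s.toList).values (fun x => x) 0 = pvM s.toList from rfl]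
  rw [hB]
  have hpw : (pvL s.toList).Pairwise (· < ·) := PySem.List.sorted_ofList_pairwise_lt s.toList
  have hf1 : ∀ ch ∈ pvL s.toList, 1 ≤ pvCnt s.toList ch := by
    intro ch hch
    have hpos : 0 < s.toList.count ch := List.count_pos_iff.mpr ((pvL_mem _ ch).mp hch)
    show (1 : Int) ≤ (s.toList.count ch : Int)
    exact_mod_cast hpos
  obtain ⟨hbound, hatt⟩ := pvMax s.toList
  rw [solveLoop_eq_levels s.toList.length (pvL s.toList) (pvCnt s.toList) (pvM s.toList) _ []
    hpw hf1 hbound hatt (pvPerm0 s.toList) (pvFuel s.toList)]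
  rfl

-- ===== VERDICT (by name: the statement is the Claim_ definition above) =====
theorem solve_spec : Claim_equal_solve := by
  intro n _string _
  unfold Spec_solve
  exact solve_eq n _string
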